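-- pv_equiv track=rewrite | github.com/alaomichael/generate_invoice | generate_receipt.py | group_by_receipt
-- ===== SOURCE A (Python) =====
-- from collections import defaultdict
--
-- def group_by_receipt(data):
--     grouped = defaultdict(list)
--     receipt_info = {}
--     last_receipt_no = None  # Keep track of the last valid receipt number
--
--     for row in data:
--         receipt_no = row.get('receipt_no')
--
--         if receipt_no:  # New receipt, save details
--             last_receipt_no = receipt_no
--             receipt_info[receipt_no] = {
--                 "customer_name": row['customer_name'],
--                 "customer_address": row['customer_address'],
--                 "payment_date": row['payment_date'],
--                 "payment_method": row['payment_method']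
--             }
--
--         # Ensure the row belongs to the last valid receipt
--         if last_receipt_no:
--             if not receipt_no:  # Fill in missing details
--                 row['receipt_no'] = last_receipt_no
--                 row['customer_name'] = receipt_info[last_receipt_no]['customer_name']
--                 row['customer_address'] = receipt_info[last_receipt_no]['customer_address']
--                 row['payment_date'] = receipt_info[last_receipt_no]['payment_date']
--                 row['payment_method'] = receipt_info[last_receipt_no]['payment_method']
--
--             grouped[last_receipt_no].append(row)
--
--     return grouped
-- ===== SOURCE B (Python) =====
-- from collections import defaultdict
--
-- def group_by_receipt(data):
--     # Pass 1: forward-fill missing receipt details into the rows themselves.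
--     cur = None  # (receipt_no, details-dict) of the last valid receipt, or None
--     for row in data:
--         receipt_no = row.get('receipt_no')
--         if receipt_no:
--             cur = (receipt_no, {
--                 "customer_name": row['customer_name'],
--                 "customer_address": row['customer_address'],
--                 "payment_date": row['payment_date'],
--                 "payment_method": row['payment_method'],
--             })
--         elif cur:
--             row['receipt_no'] = cur[0]
--             row.update(cur[1])
--     # Pass 2: group the (now-filled) rows by receipt number.
--     grouped = defaultdict(list)
--     for row in data:
--         receipt_no = row.get('receipt_no')
--         if receipt_no:
--             grouped[receipt_no].append(row)
--     return grouped
-- ===== Notes on version B (the rewrite author's own statement) =====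
-- stated objective: alternative
-- what changed: A's single stateful loop (tracking grouped, receipt_info and last_receipt_no together) is replaced by two passes: a forward-fill pass that completes each row from the last valid receipt's details, then a separate grouping pass over the filled rows.
import Mathlib
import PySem

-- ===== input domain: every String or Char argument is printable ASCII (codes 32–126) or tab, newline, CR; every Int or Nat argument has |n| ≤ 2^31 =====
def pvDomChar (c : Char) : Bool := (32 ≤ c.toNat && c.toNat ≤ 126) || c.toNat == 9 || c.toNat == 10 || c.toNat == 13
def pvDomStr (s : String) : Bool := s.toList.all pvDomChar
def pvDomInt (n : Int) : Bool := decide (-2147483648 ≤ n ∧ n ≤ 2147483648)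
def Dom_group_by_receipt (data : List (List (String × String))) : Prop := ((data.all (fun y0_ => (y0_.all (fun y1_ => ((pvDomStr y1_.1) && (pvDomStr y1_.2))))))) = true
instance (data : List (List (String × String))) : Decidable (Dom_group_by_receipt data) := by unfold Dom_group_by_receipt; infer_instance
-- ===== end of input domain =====

-- B replaces A's single stateful loop by two passes (forward-fill the rows, then group
-- the filled rows); same cost, different decomposition (objective: alternative).
-- Both Pythons mutate the input rows in place identically; the theorems are about the
-- return value (the ports are pure).

-- ===== PORT A =====
-- truthiness of row.get('receipt_no') (None or '' is falsy)
def pvTruthy (o : Option String) : Bool :=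
  match o with
  | some s => s != ""
  | none => false

-- the literal 4-key details dict {"customer_name": a, …}
def pvMk4 (a b c e : String) : PySem.Dict String String :=
  PySem.Dict.mk [("customer_name", a), ("customer_address", b), ("payment_date", c), ("payment_method", e)]

-- receipt_info[receipt_no] = {…}; row['k'] raises KeyError on a missing key, which
-- Pre_group_by_receipt excludes, so the getD "" default is exact on the admitted inputs
def pvDetails (row : PySem.Dict String String) : PySem.Dict String String :=
  pvMk4 (row.getD "customer_name" "") (row.getD "customer_address" "")
        (row.getD "payment_date" "") (row.getD "payment_method" "")

-- the four assignments row['receipt_no'] = l; row['customer_name'] = info[...]; …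
def pvFillA (row : PySem.Dict String String) (l : String) (info : PySem.Dict String String) : PySem.Dict String String :=
  ((((row.insert "receipt_no" l).insert "customer_name" (info.getD "customer_name" "")).insert
      "customer_address" (info.getD "customer_address" "")).insert
      "payment_date" (info.getD "payment_date" "")).insert
      "payment_method" (info.getD "payment_method" "")

-- A's single for-loop over data, state = (grouped, receipt_info, last_receipt_no)
def pvGoA (g : PySem.Dict String (List (List (String × String))))
    (info : PySem.Dict String (PySem.Dict String String)) (last : Option String) :
    List (List (String × String)) → PySem.Dict String (List (List (String × String)))
  | [] => g
  | r :: rest =>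
    let row := PySem.Dict.mk r
    let rn := row.get? "receipt_no"
    let info' := if pvTruthy rn then info.insert (rn.getD "") (pvDetails row) else info
    let last' := if pvTruthy rn then rn else last
    if pvTruthy last' then
      let l := last'.getD ""
      let row' := if pvTruthy rn then row else pvFillA row l ((info'.get? l).getD PySem.Dict.empty)
      pvGoA (g.insert l (g.getD l [] ++ [row'.items])) info' last' rest
    else pvGoA g info' last' rest

def group_by_receipt (data : List (List (String × String))) : List (String × List (List (String × String))) :=
  (pvGoA PySem.Dict.empty PySem.Dict.empty none data).items

-- ===== PORT B =====
-- row['receipt_no'] = cur[0]; row.update(cur[1])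
def pvFillB (row : PySem.Dict String String) (l : String) (d : PySem.Dict String String) : PySem.Dict String String :=
  d.items.foldl (fun r p => r.insert p.1 p.2) (row.insert "receipt_no" l)

-- pass 1: forward-fill, state cur = the last valid (receipt_no, details) or None
def pvPass1 (cur : Option (String × PySem.Dict String String)) :
    List (List (String × String)) → List (List (String × String))
  | [] => []
  | r :: rest =>
    let row := PySem.Dict.mk r
    let rn := row.get? "receipt_no"
    if pvTruthy rn then r :: pvPass1 (some (rn.getD "", pvDetails row)) rest
    else
      match cur with
      | some (l, d) => (pvFillB row l d).items :: pvPass1 cur rest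
      | none => r :: pvPass1 cur rest

-- pass 2: grouped[rn].append(row) for rows with a truthy receipt_no
def pvPass2 (g : PySem.Dict String (List (List (String × String)))) :
    List (List (String × String)) → PySem.Dict String (List (List (String × String)))
  | [] => g
  | r :: rest =>
    let rn := (PySem.Dict.mk r).get? "receipt_no"
    if pvTruthy rn then pvPass2 (g.insert (rn.getD "") (g.getD (rn.getD "") [] ++ [r])) rest
    else pvPass2 g rest

def group_by_receipt_alt (data : List (List (String × String))) : List (String × List (List (String × String))) :=
  (pvPass2 PySem.Dict.empty (pvPass1 none data)).items

-- ===== PRECONDITION & SPEC =====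
-- Pre_ excludes exactly the inputs on which Python A raises KeyError: a row whose
-- receipt_no is truthy but which lacks one of the four detail keys.
def Pre_group_by_receipt (data : List (List (String × String))) : Prop :=
  ∀ r ∈ data, pvTruthy ((PySem.Dict.mk r).get? "receipt_no") = true →
    ((PySem.Dict.mk r).contains "customer_name" = true ∧
     (PySem.Dict.mk r).contains "customer_address" = true ∧
     (PySem.Dict.mk r).contains "payment_date" = true ∧
     (PySem.Dict.mk r).contains "payment_method" = true)
instance (data : List (List (String × String))) : Decidable (Pre_group_by_receipt data) := by
  unfold Pre_group_by_receipt; infer_instance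

def pvWitness_group_by_receipt : (List (List (String × String))) :=
  [[("receipt_no", "R1"), ("customer_name", "Ann"), ("customer_address", "5 Rd"),
    ("payment_date", "2024-01-01"), ("payment_method", "cash")],
   [("item", "pen")]]

def Spec_group_by_receipt (data : List (List (String × String))) (out : List (String × List (List (String × String)))) : Prop := out = group_by_receipt_alt data
instance (data : List (List (String × String))) (out : List (String × List (List (String × String)))) : Decidable (Spec_group_by_receipt data out) := by unfold Spec_group_by_receipt; infer_instance

-- ===== CLAIM (what is proved, stated in full; the proofs are below) =====
def Claim_equal_group_by_receipt : Prop := ∀ (data : List (List (String × String))), Dom_group_by_receipt data → Pre_group_by_receipt data → Spec_group_by_receipt data (group_by_receipt data)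

-- ===== LEMMAS AND PROOFS =====

-- the loop invariant tying A's (info, last) to B's cur
def pvInv (info : PySem.Dict String (PySem.Dict String String)) (last : Option String)
    (cur : Option (String × PySem.Dict String String)) : Prop :=
  match last with
  | none => cur = none
  | some l => l ≠ "" ∧ ∃ a b c e, cur = some (l, pvMk4 a b c e) ∧ info.get? l = some (pvMk4 a b c e)

theorem pvFill_eq (row : PySem.Dict String String) (l a b c e : String) :
    pvFillA row l (pvMk4 a b c e) = pvFillB row l (pvMk4 a b c e) := by
  simp [pvFillA, pvFillB, pvMk4, PySem.Dict.getD, PySem.Dict.get?, List.foldl]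

theorem pvFillA_get_rn (row : PySem.Dict String String) (l : String) (info : PySem.Dict String String) :
    (pvFillA row l info).get? "receipt_no" = some l := by
  simp [pvFillA, PySem.Dict.get?_insert]

theorem pvDetails_mk4 (row : PySem.Dict String String) :
    ∃ a b c e, pvDetails row = pvMk4 a b c e := ⟨_, _, _, _, rfl⟩

theorem goA_cons_truthy (g info last) (r rest) (s : String)
    (hs : (PySem.Dict.mk r).get? "receipt_no" = some s) (hne : s ≠ "") :
    pvGoA g info last (r :: rest)
      = pvGoA (g.insert s (g.getD s [] ++ [r])) (info.insert s (pvDetails (PySem.Dict.mk r))) (some s) rest := by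
  simp only [pvGoA, hs, pvTruthy, bne, Option.getD_some]
  simp [hne]

theorem goA_cons_falsy_none (g info) (r rest)
    (hf : pvTruthy ((PySem.Dict.mk r).get? "receipt_no") = false) :
    pvGoA g info none (r :: rest) = pvGoA g info none rest := by
  simp only [pvGoA, hf]
  simp [pvTruthy]

theorem goA_cons_falsy_some (g info) (l : String) (r rest)
    (hf : pvTruthy ((PySem.Dict.mk r).get? "receipt_no") = false) (hl : l ≠ "") :
    pvGoA g info (some l) (r :: rest)
      = pvGoA (g.insert l (g.getD l [] ++ [(pvFillA (PySem.Dict.mk r) l ((info.get? l).getD PySem.Dict.empty)).items]))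
          info (some l) rest := by
  simp only [pvGoA, hf]
  simp [pvTruthy, hl]

theorem pass1_cons_truthy (cur) (r rest) (s : String)
    (hs : (PySem.Dict.mk r).get? "receipt_no" = some s) (hne : s ≠ "") :
    pvPass1 cur (r :: rest) = r :: pvPass1 (some (s, pvDetails (PySem.Dict.mk r))) rest := by
  simp only [pvPass1, hs]
  simp [pvTruthy, hne]

theorem pass1_cons_falsy_none (r rest)
    (hf : pvTruthy ((PySem.Dict.mk r).get? "receipt_no") = false) :
    pvPass1 none (r :: rest) = r :: pvPass1 none rest := by
  simp only [pvPass1, hf]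
  simp

theorem pass1_cons_falsy_some (l : String) (d) (r rest)
    (hf : pvTruthy ((PySem.Dict.mk r).get? "receipt_no") = false) :
    pvPass1 (some (l, d)) (r :: rest)
      = (pvFillB (PySem.Dict.mk r) l d).items :: pvPass1 (some (l, d)) rest := by
  simp only [pvPass1, hf]
  simp

theorem pass2_cons_truthy (g) (r rest) (s : String)
    (hs : (PySem.Dict.mk r).get? "receipt_no" = some s) (hne : s ≠ "") :
    pvPass2 g (r :: rest) = pvPass2 (g.insert s (g.getD s [] ++ [r])) rest := by
  simp only [pvPass2, hs]
  simp [pvTruthy, hne]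

theorem pass2_cons_falsy (g) (r rest)
    (hf : pvTruthy ((PySem.Dict.mk r).get? "receipt_no") = false) :
    pvPass2 g (r :: rest) = pvPass2 g rest := by
  simp only [pvPass2, hf]
  simp

theorem pvMain (rest : List (List (String × String)))
    (g : PySem.Dict String (List (List (String × String))))
    (info : PySem.Dict String (PySem.Dict String String)) (last : Option String)
    (cur : Option (String × PySem.Dict String String)) (h : pvInv info last cur) :
    pvGoA g info last rest = pvPass2 g (pvPass1 cur rest) := by
  induction rest generalizing g info last cur with
  | nil => simp [pvGoA, pvPass1, pvPass2]
  | cons r rest ih =>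
    by_cases ht : pvTruthy ((PySem.Dict.mk r).get? "receipt_no") = true
    · obtain ⟨s, hs, hne⟩ : ∃ s, (PySem.Dict.mk r).get? "receipt_no" = some s ∧ s ≠ "" := by
        cases hrn : (PySem.Dict.mk r).get? "receipt_no" with
        | none => rw [hrn] at ht; simp [pvTruthy] at ht
        | some s =>
          refine ⟨s, rfl, ?_⟩
          rw [hrn] at ht; simpa [pvTruthy] using ht
      rw [goA_cons_truthy _ _ _ _ _ _ hs hne, pass1_cons_truthy _ _ _ _ hs hne,
          pass2_cons_truthy _ _ _ _ hs hne]
      apply ih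
      obtain ⟨a, b, c, e, hd⟩ := pvDetails_mk4 (PySem.Dict.mk r)
      exact ⟨hne, a, b, c, e, by rw [hd], by rw [hd, PySem.Dict.get?_insert_self]⟩
    · rw [Bool.not_eq_true] at ht
      match last, h with
      | none, h =>
        subst h
        rw [goA_cons_falsy_none _ _ _ _ ht, pass1_cons_falsy_none _ _ ht, pass2_cons_falsy _ _ _ ht]
        exact ih _ _ _ _ rfl
      | some l, ⟨hl, a, b, c, e, hcur, hinfo⟩ =>
        subst hcur
        rw [goA_cons_falsy_some _ _ _ _ _ ht hl, pass1_cons_falsy_some _ _ _ _ ht]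
        rw [hinfo]
        have hrow : PySem.Dict.mk (pvFillB (PySem.Dict.mk r) l (pvMk4 a b c e)).items
            = pvFillB (PySem.Dict.mk r) l (pvMk4 a b c e) := rfl
        rw [pass2_cons_truthy _ _ _ _ (by rw [hrow, ← pvFill_eq, pvFillA_get_rn]) hl]
        rw [Option.getD_some, pvFill_eq]
        exact ih _ _ _ _ ⟨hl, a, b, c, e, rfl, hinfo⟩

-- ===== VERDICT (by name: the statement is the Claim_ definition above) =====
theorem group_by_receipt_spec : Claim_equal_group_by_receipt := by
  intro data _ _
  unfold Spec_group_by_receipt group_by_receipt group_by_receipt_alt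
  exact congrArg PySem.Dict.items (pvMain data _ _ none none rfl)
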